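/- GENERATED by tools/from_farm_form.py from prooffarm-gif/accepted/DGifDecompressLine.9/Proof.lean (a worked proof of the farm's unit `DGifDecompressLine.9`,
   accepted by the verdict) — do not edit. -/
import Gif.Spec.Units.DGifDecompressLine_9
import Gif.Spec.AllSegs
import Gif.Spec.Proved.DGifDecompressLine_9_Lemmas

open X86 X86.User Asan ProgX.Base ProgX.Base.Spec Gif.Spec

/-!
  `DGifDecompressLine.9` (0x106d47 … 0x106da7, 25 instructions; dgif_lib.c:940-944): the arm of l.932 that accepts an undefined
  code (F-4). A BODY SEGMENT WITH A CALL IN THE MIDDLE: the return address 0x106d56 (`ret18`) of `DGifGetPrefixChar` is made a cut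
  of the unit's own, with `Mid` itself as its assertion (all the registers `Mid` mentions are callee-saved), and the two walks of
  Lemmas.lean are chained here.
-/

namespace Gif.Spec.DGifDecompressLine_9
end Gif.Spec.DGifDecompressLine_9

/-- Segment 9 of `DGifDecompressLine` takes `Mid` at 0x106d47 to `Trace` at the head 0x106e4b of the trace loop (`k = 4094`). -/
theorem Gif.Spec.Proved.DGifDecompressLine_9_ok : Gif.Spec.DGifDecompressLine_9.Statement := by
  intro Lay hLay μ hμ u₀ hcode h_DGifGetPrefixChar h_asan_store1_noabort H rest frames F R n m e ret v hat
  -- the callee's contract for the frame list of the body (the own frame in front) and the private object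
  have hgpc := h_DGifGetPrefixChar H rest (DGifDecompressLine.framesIn frames e) F.pv
  -- 0x106d47 … the call (dgif_lib.c:942) … 0x106d56
  refine (Gif.Spec.DGifDecompressLine_9.seg9_call Lay hLay μ hμ u₀ hcode H rest frames F R n m e ret hgpc v hat).trans ?_
  -- 0x106d56 … 0x106da2 → 0x106e4b (dgif_lib.c:940-944)
  intro v1 hv1
  exact Gif.Spec.DGifDecompressLine_9.seg9_tail Lay hLay μ hμ u₀ hcode H rest frames F R n m e ret h_asan_store1_noabort v1 hv1
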